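-- pv_equiv track=rewrite | github.com/Mavhawk64/DigraphicCipher | digraphic.py | word_to_2d_int_arr
-- ===== SOURCE A (Python) =====
-- alphabet = ['A','B','C','D','E','F','G','H','I','J','K','L','M','N','O','P','Q','R','S','T','U','V','W','X','Y','Z']
--
-- def word_to_2d_int_arr(word):
-- 	arr = [[]]
-- 	j = 0
-- 	for i in word:
-- 		if i == ' ':
-- 			arr.append([])
-- 			j += 1
-- 		else:
-- 			arr[j].append(alphabet.index(i))
-- 	arr = arr[:-1]
-- 	return arr
-- ===== SOURCE B (Python) =====
-- def word_to_2d_int_arr(word):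
-- 	return [[ord(c) - ord('A') for c in g] for g in word.split(' ')[:-1]]
-- ===== Notes on version B (the rewrite author's own statement) =====
-- stated objective: idiomatic
-- what changed: Replaces the char-by-char loop that tracks a group index j, mutates arr in place and scans the 26-letter alphabet list with list.index for every character, by a tokenize-then-map decomposition: word.split(' ')[:-1] yields exactly the kept groups and each letter is converted arithmetically with ord(c) - ord('A') instead of a list scan.
import Mathlib
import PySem

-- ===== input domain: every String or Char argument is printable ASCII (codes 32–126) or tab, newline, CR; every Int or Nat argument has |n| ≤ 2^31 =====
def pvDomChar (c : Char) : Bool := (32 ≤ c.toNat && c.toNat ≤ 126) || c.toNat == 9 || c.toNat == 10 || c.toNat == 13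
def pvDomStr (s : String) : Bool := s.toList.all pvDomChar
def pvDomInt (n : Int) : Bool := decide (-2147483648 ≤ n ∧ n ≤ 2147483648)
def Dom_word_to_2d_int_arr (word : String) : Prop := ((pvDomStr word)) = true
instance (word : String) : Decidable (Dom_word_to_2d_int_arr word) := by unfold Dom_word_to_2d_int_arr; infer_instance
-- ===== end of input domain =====

-- B replaces A's char-by-char loop (group index j, in-place mutation, a 26-element list
-- scan per character) by the idiomatic split(' ')[:-1] + arithmetic ord(c) - ord('A').

-- module-level constant `alphabet` of the Python module (used by A)
def pvAlphabet : List Char :=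
  ['A','B','C','D','E','F','G','H','I','J','K','L','M','N','O','P','Q','R','S','T','U','V','W','X','Y','Z']

-- alphabet.index(c); Python raises ValueError when c ∉ alphabet — exactly those inputs
-- are excluded by Pre_, so the getD 0 default is never reached on admitted inputs.
def pvIdx (c : Char) : Int := ((PySem.List.index? pvAlphabet c).getD 0 : Nat)

-- ===== PORT A =====
-- one iteration of A's for-loop over (arr, j); arr[j].append(...) is set at index j
def pvStepA (s : List (List Int) × Nat) (c : Char) : List (List Int) × Nat :=
  if c = ' ' then (s.1 ++ [([] : List Int)], s.2 + 1)
  else (s.1.set s.2 (s.1.getD s.2 [] ++ [pvIdx c]), s.2)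

def word_to_2d_int_arr (word : String) : List (List Int) :=
  let arr := (word.toList.foldl pvStepA ([[]], 0)).1
  PySem.List.slice arr none (some (-1))      -- arr = arr[:-1]

-- ===== PORT B =====
-- word.split(' ')[:-1] on code points, then the nested map with ord(c) - ord('A')
def word_to_2d_int_arr_alt (word : String) : List (List Int) :=
  (PySem.List.slice (PySem.Chars.splitOn word.toList [' ']) none (some (-1))).map
    (fun g => g.map (fun c => (c.toNat : Int) - ('A'.toNat : Int)))

-- ===== PRECONDITION & SPEC =====
-- Pre_ excludes exactly the inputs on which A raises ValueError: a character that is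
-- neither a space nor an uppercase letter of `alphabet`.
def Pre_word_to_2d_int_arr (word : String) : Prop :=
  (word.toList.all (fun c => c == ' ' || pvAlphabet.contains c)) = true
instance (word : String) : Decidable (Pre_word_to_2d_int_arr word) := by
  unfold Pre_word_to_2d_int_arr; infer_instance

def pvWitness_word_to_2d_int_arr : String := "AB C "

def Spec_word_to_2d_int_arr (word : String) (out : List (List Int)) : Prop := out = word_to_2d_int_arr_alt word
instance (word : String) (out : List (List Int)) : Decidable (Spec_word_to_2d_int_arr word out) := by unfold Spec_word_to_2d_int_arr; infer_instance

-- ===== CLAIM (what is proved, stated in full; the proofs are below) =====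
def Claim_equal_word_to_2d_int_arr : Prop := ∀ (word : String), Dom_word_to_2d_int_arr word → Pre_word_to_2d_int_arr word → Spec_word_to_2d_int_arr word (word_to_2d_int_arr word)

-- ===== LEMMAS AND PROOFS =====

-- reference left-to-right splitter on a single space
def pvSp : List Char → List (List Char)
  | [] => [[]]
  | c :: t =>
    if c = ' ' then [] :: pvSp t
    else match pvSp t with
      | g :: gs => (c :: g) :: gs
      | [] => [[c]]        -- unreachable: pvSp is never []

theorem pvSp_ne_nil (l : List Char) : pvSp l ≠ [] := by
  cases l with
  | nil => simp [pvSp]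
  | cons c t =>
    simp only [pvSp]
    split_ifs with h
    · simp
    · cases hh : pvSp t <;> simp

-- prepend to the first group
def pvConsH (x : List Char) : List (List Char) → List (List Char)
  | g :: gs => (x ++ g) :: gs
  | [] => [x]

theorem splitOn_go_space (fuel : Nat) : ∀ (l cur : List Char) (acc : List (List Char)),
    l.length ≤ fuel →
    PySem.Chars.splitOn.go [' '] fuel l cur acc = acc.reverse ++ pvConsH cur.reverse (pvSp l) := by
  induction fuel with
  | zero =>
    intro l cur acc h
    have : l = [] := by cases l <;> simp_all
    subst this
    rw [PySem.Chars.splitOn.go]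
    simp [pvSp, pvConsH]
  | succ n ih =>
    intro l cur acc h
    cases l with
    | nil =>
      rw [PySem.Chars.splitOn.go] <;> simp [pvSp, pvConsH]
    | cons c rest =>
      rw [PySem.Chars.splitOn.go]
      by_cases hc : c = ' '
      · subst hc
        simp only [List.isPrefixOf, BEq.rfl, Bool.true_and, if_pos]
        have hd : List.drop [' '].length (' ' :: rest) = rest := rfl
        rw [hd, ih rest [] (cur.reverse :: acc) (by simpa using Nat.le_of_succ_le_succ h)]
        simp [pvSp, pvConsH]
        cases hh : pvSp rest with
        | nil => exact absurd hh (pvSp_ne_nil rest)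
        | cons g gs => simp [pvConsH]
      · have hpre : ([' '].isPrefixOf (c :: rest)) = false := by
          simp [List.isPrefixOf]
          exact fun h' => absurd h'.symm hc
        simp only [hpre, Bool.false_eq_true, if_false]
        rw [ih rest (c :: cur) acc (by simpa using Nat.le_of_succ_le_succ h)]
        have : pvSp (c :: rest) = match pvSp rest with
          | g :: gs => (c :: g) :: gs
          | [] => [[c]] := by simp [pvSp, hc]
        rw [this]
        cases hh : pvSp rest with
        | nil => exact absurd hh (pvSp_ne_nil rest)
        | cons g gs => simp [pvConsH]

theorem splitOn_space (l : List Char) : PySem.Chars.splitOn l [' '] = pvSp l := by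
  unfold PySem.Chars.splitOn
  rw [splitOn_go_space (l.length + 1) l [] [] (by omega)]
  cases hh : pvSp l with
  | nil => exact absurd hh (pvSp_ne_nil l)
  | cons g gs => simp [pvConsH]

def pvConsHI (x : List Int) : List (List Int) → List (List Int)
  | g :: gs => (x ++ g) :: gs
  | [] => [x]

-- A's loop body, applied to groups so far (acc) and the current (last) group
def pvMapSp (cur : List Int) : List Char → List (List Int)
  | [] => [cur]
  | c :: t => if c = ' ' then cur :: pvMapSp [] t else pvMapSp (cur ++ [pvIdx c]) t

theorem foldA (cs : List Char) : ∀ (acc : List (List Int)) (cur : List Int),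
    (cs.foldl pvStepA (acc ++ [cur], acc.length)).1 = acc ++ pvMapSp cur cs := by
  induction cs with
  | nil => intro acc cur; simp [pvMapSp]
  | cons c t ih =>
    intro acc cur
    by_cases hc : c = ' '
    · subst hc
      have hstep : pvStepA (acc ++ [cur], acc.length) ' ' =
          ((acc ++ [cur]) ++ [([] : List Int)], (acc ++ [cur]).length) := by
        simp [pvStepA]
      simp only [List.foldl_cons, hstep, ih (acc ++ [cur]) []]
      simp [pvMapSp]
    · have hget : (acc ++ [cur]).getD acc.length [] = cur := by
        simp [List.getD]
      have hset : (acc ++ [cur]).set acc.length (cur ++ [pvIdx c]) =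
          acc ++ [cur ++ [pvIdx c]] := by
        rw [List.set_append_right _ _ (Nat.le_refl _)]
        simp
      have hstep : pvStepA (acc ++ [cur], acc.length) c =
          (acc ++ [cur ++ [pvIdx c]], acc.length) := by
        simp [pvStepA, hc, hset]
      simp only [List.foldl_cons, hstep, ih acc (cur ++ [pvIdx c])]
      simp [pvMapSp, hc]

theorem mapSp_eq (cs : List Char) : ∀ (cur : List Int),
    pvMapSp cur cs = pvConsHI cur ((pvSp cs).map (fun g => g.map pvIdx)) := by
  induction cs with
  | nil => intro cur; simp [pvMapSp, pvSp, pvConsHI]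
  | cons c t ih =>
    intro cur
    by_cases hc : c = ' '
    · subst hc
      simp only [pvMapSp, ih [], pvSp, if_true, reduceIte]
      cases hh : pvSp t with
      | nil => exact absurd hh (pvSp_ne_nil t)
      | cons g gs => simp [pvConsHI]
    · simp only [pvMapSp, if_neg hc, ih (cur ++ [pvIdx c])]
      have : pvSp (c :: t) = match pvSp t with
        | g :: gs => (c :: g) :: gs
        | [] => [[c]] := by simp [pvSp, hc]
      rw [this]
      cases hh : pvSp t with
      | nil => exact absurd hh (pvSp_ne_nil t)
      | cons g gs => simp [pvConsHI]

-- chars inside groups of pvSp are non-space chars of the input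
theorem pvSp_mem (l : List Char) : ∀ g ∈ pvSp l, ∀ c ∈ g, c ∈ l ∧ c ≠ ' ' := by
  induction l with
  | nil => intro g hg c hc; simp [pvSp] at hg; subst hg; simp at hc
  | cons a t ih =>
    intro g hg c hc
    by_cases ha : a = ' '
    · subst ha
      simp only [pvSp, if_true, reduceIte, List.mem_cons] at hg
      rcases hg with rfl | hg
      · simp at hc
      · have := ih g hg c hc
        exact ⟨List.mem_cons_of_mem _ this.1, this.2⟩
    · simp only [pvSp, if_neg ha] at hg
      cases hh : pvSp t with
      | nil => exact absurd hh (pvSp_ne_nil t)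
      | cons g0 gs =>
        rw [hh] at hg
        simp only [List.mem_cons] at hg
        rcases hg with rfl | hg
        · rcases List.mem_cons.1 hc with rfl | hc0
          · exact ⟨List.mem_cons_self, ha⟩
          · have := ih g0 (by rw [hh]; exact List.mem_cons_self) c hc0
            exact ⟨List.mem_cons_of_mem _ this.1, this.2⟩
        · have := ih g (by rw [hh]; exact List.mem_cons_of_mem _ hg) c hc
          exact ⟨List.mem_cons_of_mem _ this.1, this.2⟩

-- on alphabet letters, list.index agrees with the arithmetic code-point formula
theorem pvIdx_eq_ord (c : Char) (h : c ∈ pvAlphabet) :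
    pvIdx c = (c.toNat : Int) - ('A'.toNat : Int) := by
  fin_cases h <;> decide

theorem pvDropLast_map {α β : Type} (f : α → β) (l : List α) :
    (l.map f).dropLast = l.dropLast.map f := by
  simp [List.dropLast_eq_take, List.map_take]

theorem ports_agree (word : String) (hpre : Pre_word_to_2d_int_arr word) :
    word_to_2d_int_arr word = word_to_2d_int_arr_alt word := by
  unfold word_to_2d_int_arr word_to_2d_int_arr_alt
  have h0 : (word.toList.foldl pvStepA ([[]], 0)).1 = [] ++ pvMapSp [] word.toList := by
    have := foldA word.toList [] []
    simpa using this
  rw [h0, splitOn_space, mapSp_eq]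
  have hconsh : pvConsHI [] ((pvSp word.toList).map (fun g => g.map pvIdx)) =
      (pvSp word.toList).map (fun g => g.map pvIdx) := by
    cases hh : pvSp word.toList with
    | nil => exact absurd hh (pvSp_ne_nil word.toList)
    | cons g gs => simp [pvConsHI]
  rw [List.nil_append, hconsh, PySem.List.slice_to_neg_one, PySem.List.slice_to_neg_one,
    pvDropLast_map]
  apply List.map_congr_left
  intro g hg
  apply List.map_congr_left
  intro c hc
  have hmem := pvSp_mem word.toList g (List.dropLast_subset _ hg) c hc
  unfold Pre_word_to_2d_int_arr at hpre
  rw [List.all_eq_true] at hpre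
  have := hpre c hmem.1
  simp only [Bool.or_eq_true, beq_iff_eq] at this
  rcases this with rfl | halpha
  · exact absurd rfl hmem.2
  · exact pvIdx_eq_ord c (by simpa using halpha)

-- ===== VERDICT (by name: the statement is the Claim_ definition above) =====
theorem word_to_2d_int_arr_spec : Claim_equal_word_to_2d_int_arr := by
  intro word _ hpre
  unfold Spec_word_to_2d_int_arr
  exact ports_agree word hpre
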